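-- pv_equiv track=rewrite | github.com/sydselynch/CIS-433 | project submission/PoWNetwork/hash_mobile.py | check_hash
-- ===== SOURCE A (Python) =====
-- def check_hash(hashcode, target):
--     zeros = 0
--     check_index = 0
--     for index in range(len(hashcode)):
--         if (hashcode[index] == "0") and (index == check_index):
--             zeros += 1
--             check_index += 1
--         elif (zeros == target):
--             return True
--         else:
--             return False
--     return False
-- ===== SOURCE B (Python) =====
-- def check_hash(hashcode, target):
--     stripped = hashcode.lstrip("0")
--     return stripped != "" and (len(hashcode) - len(stripped)) == target
-- ===== Notes on version B (the rewrite author's own statement) =====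
-- stated objective: idiomatic
-- what changed: Replaces the indexed scan with zeros/check_index bookkeeping and early returns by a single lstrip('0') and a length-difference comparison.
import Mathlib
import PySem

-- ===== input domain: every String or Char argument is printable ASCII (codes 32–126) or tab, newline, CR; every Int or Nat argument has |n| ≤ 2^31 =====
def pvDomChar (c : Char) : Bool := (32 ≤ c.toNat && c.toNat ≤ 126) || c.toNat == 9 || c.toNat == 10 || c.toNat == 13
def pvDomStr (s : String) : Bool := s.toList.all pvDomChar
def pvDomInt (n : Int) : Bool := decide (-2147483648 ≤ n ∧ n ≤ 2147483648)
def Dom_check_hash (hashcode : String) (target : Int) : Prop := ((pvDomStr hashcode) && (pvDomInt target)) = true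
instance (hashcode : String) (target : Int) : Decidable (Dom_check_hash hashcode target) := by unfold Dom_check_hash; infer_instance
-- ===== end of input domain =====

-- B replaces A's indexed scan with zeros/check_index bookkeeping by lstrip('0') and a length difference (idiomatic, same cost).


-- ===== PORT A =====
-- the for-loop over range(len(hashcode)) with early return, state (zeros, check_index), index carried explicitly
def check_hash_go (cs : List Char) (index zeros check_index : Int) (target : Int) : Bool :=
  match cs with
  | [] => false
  | c :: rest =>
    if c == '0' && index == check_index then
      check_hash_go rest (index + 1) (zeros + 1) (check_index + 1) target
    else
      decide (zeros = target)

def check_hash (hashcode : String) (target : Int) : Bool :=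
  check_hash_go hashcode.toList 0 0 0 target

-- ===== PORT B =====
-- hashcode.lstrip("0") ported by hand as dropWhile (· == '0') on the code points (exact: lstrip with an
-- explicit char set drops exactly the leading chars in the set)
def check_hash_alt (hashcode : String) (target : Int) : Bool :=
  let stripped := hashcode.toList.dropWhile (fun c => c == '0')
  decide (stripped ≠ [] ∧ ((hashcode.toList.length : Int) - (stripped.length : Int)) = target)

-- ===== PRECONDITION & SPEC =====
def Spec_check_hash (hashcode : String) (target : Int) (out : Bool) : Prop := out = check_hash_alt hashcode target
instance (hashcode : String) (target : Int) (out : Bool) : Decidable (Spec_check_hash hashcode target out) := by unfold Spec_check_hash; infer_instance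

-- ===== CLAIM (what is proved, stated in full; the proofs are below) =====
def Claim_equal_check_hash : Prop := ∀ (hashcode : String) (target : Int), Dom_check_hash hashcode target → Spec_check_hash hashcode target (check_hash hashcode target)

-- ===== LEMMAS AND PROOFS =====
-- invariant of A's loop: as long as the loop is still running, index = check_index = zeros = k
theorem check_hash_go_eq (cs : List Char) (k target : Int) :
    check_hash_go cs k k k target =
      decide (cs.dropWhile (fun c => c == '0') ≠ [] ∧
        k + ((cs.length : Int) - ((cs.dropWhile (fun c => c == '0')).length : Int)) = target) := by
  induction cs generalizing k with
  | nil => simp [check_hash_go]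
  | cons c rest ih =>
    by_cases hc : c = '0'
    · subst hc
      rw [show check_hash_go ('0' :: rest) k k k target
            = check_hash_go rest (k+1) (k+1) (k+1) target from by simp [check_hash_go],
          ih, show List.dropWhile (fun c => c == '0') ('0' :: rest)
                = List.dropWhile (fun c => c == '0') rest from
            List.dropWhile_cons_of_pos (by simp),
          decide_eq_decide]
      simp only [List.length_cons]
      constructor <;> rintro ⟨h1, h2⟩ <;> exact ⟨h1, by push_cast at h2 ⊢; omega⟩
    · rw [show check_hash_go (c :: rest) k k k target = decide (k = target) from by
            simp [check_hash_go, hc],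
          show List.dropWhile (fun x => x == '0') (c :: rest) = c :: rest from
            List.dropWhile_cons_of_neg (by simp [hc]),
          decide_eq_decide]
      simp only [ne_eq, reduceCtorEq, not_false_eq_true, true_and, List.length_cons]
      push_cast
      constructor <;> intro h <;> omega
-- ===== VERDICT (by name: the statement is the Claim_ definition above) =====
theorem check_hash_spec : Claim_equal_check_hash := by
  intro hashcode target _
  unfold Spec_check_hash check_hash check_hash_alt
  simpa using check_hash_go_eq hashcode.toList 0 target
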